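-- pv_equiv track=rewrite | github.com/felipereyel/advent-of-code-2024 | problems/07/second/main.py | operand_reducer
-- ===== SOURCE A (Python) =====
-- from typing import List, Tuple
--
-- def concat(a: int, b: int):
--     return int(f"{a}{b}")
--
-- def operand_reducer(operands: List[int]) -> List[int]:
--     n_operands = len(operands)
--     if n_operands == 0:
--         raise Exception("empty operands")
--
--     if n_operands == 1:
--         return operands
--
--     *others, rmost = operands
--
--     others_value = operand_reducer(others)
--     plus = [v + rmost for v in others_value]
--     mult = [v * rmost for v in others_value]
--     conc = [concat(v, rmost) for v in others_value]
--
--     return [*plus, *mult, *conc]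
-- ===== SOURCE B (Python) =====
-- from typing import List
--
-- def concat(a: int, b: int):
--     return int(f"{a}{b}")
--
-- def operand_reducer(operands: List[int]) -> List[int]:
--     if not operands:
--         raise Exception("empty operands")
--     values = [operands[0]]
--     for r in operands[1:]:
--         values = [v + r for v in values] + [v * r for v in values] + [concat(v, r) for v in values]
--     return values
-- ===== Notes on version B (the rewrite author's own statement) =====
-- stated objective: simpler
-- what changed: Replaces right-peeling recursion (dropLast/getLast unpacking at every level) with a single iterative left-to-right fold that expands a value list per operand.
import Mathlib
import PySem

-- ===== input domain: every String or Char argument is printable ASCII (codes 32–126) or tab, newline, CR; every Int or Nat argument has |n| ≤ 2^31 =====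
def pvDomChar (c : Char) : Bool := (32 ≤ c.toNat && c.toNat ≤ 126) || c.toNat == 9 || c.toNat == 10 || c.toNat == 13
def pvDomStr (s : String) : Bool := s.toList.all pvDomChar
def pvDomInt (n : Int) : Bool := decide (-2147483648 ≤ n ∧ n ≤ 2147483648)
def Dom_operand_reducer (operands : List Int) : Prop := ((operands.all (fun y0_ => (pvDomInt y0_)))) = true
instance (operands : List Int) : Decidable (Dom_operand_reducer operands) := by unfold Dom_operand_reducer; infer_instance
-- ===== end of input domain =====

-- B replaces A's right-peeling recursion by a single left-to-right fold; objective: simpler (return value only).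

-- ===== PORT A =====
-- shared helper `concat`: int(f"{a}{b}"); Python raises ValueError when the parse fails
-- (e.g. b < 0); those inputs are excluded by Pre_, so the .getD 0 default is never reached there.
def pyConcat (a b : Int) : Int := (PySem.Int.ofStr? (PySem.Int.toStr a ++ PySem.Int.toStr b)).getD 0

def operand_reducer (operands : List Int) : List Int :=
  if h0 : operands.length = 0 then []            -- Python: raise Exception (excluded by Pre_)
  else if h1 : operands.length = 1 then operands
  else
    let others := operands.dropLast
    let rmost := operands.getLastD 0             -- exact: operands nonempty here
    let others_value := operand_reducer others
    (others_value.map (· + rmost)) ++ (others_value.map (· * rmost)) ++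
      (others_value.map (fun v => pyConcat v rmost))
termination_by operands.length
decreasing_by simp [List.length_dropLast]; omega

-- ===== PORT B =====
def operand_reducer_alt (operands : List Int) : List Int :=
  match operands with
  | [] => []                                     -- Python: raise Exception (excluded by Pre_)
  | x :: rest =>
      rest.foldl (fun values r =>
        (values.map (· + r)) ++ (values.map (· * r)) ++
          (values.map (fun v => pyConcat v r))) [x]

-- ===== PRECONDITION & SPEC =====
-- Pre_ excludes the empty list (A raises Exception) and lists with a negative operand after
-- the first (concat builds e.g. "1-2" and int() raises ValueError).
def Pre_operand_reducer (operands : List Int) : Prop :=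
  operands ≠ [] ∧ ∀ r ∈ operands.tail, 0 ≤ r
instance (operands : List Int) : Decidable (Pre_operand_reducer operands) := by
  unfold Pre_operand_reducer; infer_instance
def pvWitness_operand_reducer : List Int := [1, 2]

def Spec_operand_reducer (operands : List Int) (out : List Int) : Prop := out = operand_reducer_alt operands
instance (operands : List Int) (out : List Int) : Decidable (Spec_operand_reducer operands out) := by unfold Spec_operand_reducer; infer_instance

-- ===== CLAIM (what is proved, stated in full; the proofs are below) =====
def Claim_equal_operand_reducer : Prop := ∀ (operands : List Int), Dom_operand_reducer operands → Pre_operand_reducer operands → Spec_operand_reducer operands (operand_reducer operands)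

-- ===== LEMMAS AND PROOFS =====

-- one unfolding of A at a snoc: peeling the last element of a list of length ≥ 2
lemma operand_reducer_snoc (x r : Int) (rs : List Int) :
    operand_reducer (x :: (rs ++ [r])) =
      ((operand_reducer (x :: rs)).map (· + r)) ++ ((operand_reducer (x :: rs)).map (· * r)) ++
        ((operand_reducer (x :: rs)).map (fun v => pyConcat v r)) := by
  rw [operand_reducer]
  have h1 : (x :: (rs ++ [r])).dropLast = x :: rs := by
    rw [← List.cons_append, List.dropLast_concat]
  have h2 : (x :: (rs ++ [r])).getLast? = some r := by
    rw [← List.cons_append]; exact List.getLast?_concat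
  simp [h1, h2]

lemma operand_reducer_single (x : Int) : operand_reducer [x] = [x] := by
  rw [operand_reducer]; simp

lemma operand_reducer_eq_alt (rs : List Int) (x : Int) :
    operand_reducer (x :: rs) = operand_reducer_alt (x :: rs) := by
  induction rs using List.reverseRecOn with
  | nil => simp [operand_reducer_single, operand_reducer_alt]
  | append_singleton rs' r ih =>
      rw [operand_reducer_snoc, ih]
      simp [operand_reducer_alt, List.foldl_append]

-- ===== VERDICT (by name: the statement is the Claim_ definition above) =====
theorem operand_reducer_spec : Claim_equal_operand_reducer := by
  intro operands _ hpre
  cases operands with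
  | nil => exact absurd rfl hpre.1
  | cons x rs => exact operand_reducer_eq_alt rs x
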